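-- pv_equiv track=rewrite | github.com/dansalvato/melee-gci-compiler | mgc/gci_tools/mem2gci.py | gci2mem
-- ===== SOURCE A (Python) =====
-- BLOCK_LIST = [          #GCI block offset list
--         0x02060,        #Block 0
--         0x04060,        #Block 1
--         0x06060,        #Block 2
--         0x08060,        #Block 3
--         0x0a060,        #Block 4
--         0x0c060,        #Block 5
--         0x0e060,        #Block 6
--         0x10060,        #Block 7
--         0x12060,        #Block 8
--         0x14060,        #Block 9
--         ]
--
-- MEM_LIST = [            #Melee start address for each GCI block
--         0x00000000,     #Block 0 (not in memory)
--         0x8045d6b8,     #Block 1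
--         0x8045f5e4,     #Block 2
--         0x80461510,     #Block 3
--         0x8046343c,     #Block 4
--         0x80465368,     #Block 5
--         0x80467294,     #Block 6
--         0x804691c0,     #Block 7
--         0x00000000,     #Block 8 (not in memory)
--         0x8045bf28,     #Block 9
--         ]
--
-- BLOCK_SIZE = [0, 0x1f2c, 0x1f2c, 0x1f2c, 0x1f2c, 0x1f2c, 0x1f2c, 0x1f2c, 0, 0x1790]
--
-- BLOCK_START = BLOCK_LIST[0]
--
-- BLOCK_END = BLOCK_LIST[9] + BLOCK_SIZE[9]
--
-- def gci2mem(gci_address: int) -> int: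
--     """Takes a GCI offset address and returns the corresponding Melee memory
--        location."""
--     if gci_address < BLOCK_START or gci_address >= BLOCK_END:
--         raise ValueError("GCI address 0x%05x does not have a corresponding Melee memory location" % gci_address)
--     block_number = -1
--     offset = 0
--     for index, block_address in enumerate(BLOCK_LIST):
--         offset = gci_address - block_address
--         if offset >= BLOCK_SIZE[index] or offset < 0: continue
--         block_number = index
--         break
--     if block_number < 0:
--         raise ValueError("GCI address 0x%05x does not have a corresponding Melee memory location" % gci_address)
--     return MEM_LIST[block_number] + offset
-- ===== SOURCE B (Python) =====
-- def gci2mem(gci_address: int) -> int: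
--     """Takes a GCI offset address and returns the corresponding Melee memory
--        location."""
--     # Pure arithmetic, no tables: blocks sit every 0x2000 bytes from 0x2060.
--     # Blocks 1-7 map to 0x8045d6b8 + (index-1)*0x1f2c; block 9 maps just
--     # below block 1 at 0x8045bf28; blocks 0 and 8 have no memory image.
--     if gci_address < 0x2060 or gci_address >= 0x157f0:
--         raise ValueError("GCI address 0x%05x does not have a corresponding Melee memory location" % gci_address)
--     index, offset = divmod(gci_address - 0x2060, 0x2000)
--     if index in (0, 8) or offset >= (0x1790 if index == 9 else 0x1f2c):
--         raise ValueError("GCI address 0x%05x does not have a corresponding Melee memory location" % gci_address)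
--     return (0x8045bf28 if index == 9 else 0x8045d6b8 + (index - 1) * 0x1f2c) + offset
-- ===== Notes on version B (the rewrite author's own statement) =====
-- stated objective: simpler
-- what changed: Eliminates all three lookup tables and the scan loop: the block index and offset come from one divmod, validity is a direct index/offset test, and the memory address is a closed-form linear expression in the index (with a special base for the last block), since the Melee regions are evenly spaced.
-- outside the precondition, e.g. on gci2mem(0): A raises ValueError, B raises ValueError; on gci2mem(8448): A raises ValueError, B raises ValueError; on gci2mem(16384): A raises ValueError, B raises ValueError
import Mathlib
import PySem

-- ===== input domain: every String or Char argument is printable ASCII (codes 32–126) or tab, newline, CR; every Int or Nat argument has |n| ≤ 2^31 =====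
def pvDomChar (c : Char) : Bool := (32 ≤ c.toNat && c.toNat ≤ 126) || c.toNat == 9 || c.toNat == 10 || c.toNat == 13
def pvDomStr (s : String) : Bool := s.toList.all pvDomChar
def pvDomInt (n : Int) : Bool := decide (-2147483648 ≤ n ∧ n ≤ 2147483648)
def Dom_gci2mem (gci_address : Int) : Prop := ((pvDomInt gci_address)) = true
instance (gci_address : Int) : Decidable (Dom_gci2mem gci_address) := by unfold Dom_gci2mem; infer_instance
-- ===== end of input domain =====

-- B drops A's three lookup tables and scan loop for a single divmod and a closed-form base address (simpler, table-free).
-- Both programs raise ValueError on the same inputs; Pre_ excludes exactly those (A returns no value there).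


-- ===== PORT A =====
def aBlockList : List Int := [0x02060, 0x04060, 0x06060, 0x08060, 0x0a060, 0x0c060, 0x0e060, 0x10060, 0x12060, 0x14060]
def aMemList : List Int := [0x00000000, 0x8045d6b8, 0x8045f5e4, 0x80461510, 0x8046343c, 0x80465368, 0x80467294, 0x804691c0, 0x00000000, 0x8045bf28]
def aBlockSize : List Int := [0, 0x1f2c, 0x1f2c, 0x1f2c, 0x1f2c, 0x1f2c, 0x1f2c, 0x1f2c, 0, 0x1790]
def aBlockStart : Int := PySem.List.pyGetD aBlockList 0 0
def aBlockEnd : Int := PySem.List.pyGetD aBlockList 9 0 + PySem.List.pyGetD aBlockSize 9 0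

-- the for-loop with continue/break: state (block_number, offset); BLOCK_SIZE[index] is always in range
def aLoop (a : Int) (bn off : Int) : List (Int × Int) → Int × Int
  | [] => (bn, off)
  | (index, blockAddress) :: rest =>
      let off' := a - blockAddress
      if off' ≥ PySem.List.pyGetD aBlockSize index 0 ∨ off' < 0 then aLoop a bn off' rest
      else (index, off')

def gci2mem (gci_address : Int) : Int :=
  if gci_address < aBlockStart ∨ gci_address ≥ aBlockEnd then 0  -- raise ValueError (outside Pre_)
  else
    let r := aLoop gci_address (-1) 0 (PySem.List.enumerate aBlockList)
    if r.1 < 0 then 0  -- raise ValueError (outside Pre_)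
    else PySem.List.pyGetD aMemList r.1 0 + r.2

-- ===== PORT B =====
def gci2mem_alt (gci_address : Int) : Int :=
  if gci_address < 0x2060 ∨ gci_address ≥ 0x157f0 then 0  -- raise ValueError (outside Pre_)
  else
    let index := PySem.Int.floordiv (gci_address - 0x2060) 0x2000
    let offset := PySem.Int.mod (gci_address - 0x2060) 0x2000
    if index = 0 ∨ index = 8 ∨ offset ≥ (if index = 9 then 0x1790 else 0x1f2c) then 0  -- raise ValueError (outside Pre_)
    else (if index = 9 then 0x8045bf28 else 0x8045d6b8 + (index - 1) * 0x1f2c) + offset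

-- ===== PRECONDITION & SPEC =====
-- Pre_ excludes exactly the inputs on which Python A raises ValueError (addresses outside
-- [BLOCK_START, BLOCK_END) and addresses falling in a gap or in the zero-size blocks 0 and 8).
def Pre_gci2mem (gci_address : Int) : Prop :=
  0x4060 ≤ gci_address ∧ gci_address < 0x157f0 ∧
  (gci_address < 0x12060 ∨ 0x14060 ≤ gci_address) ∧
  (gci_address - 0x60) % 0x2000 < 0x1f2c
instance (gci_address : Int) : Decidable (Pre_gci2mem gci_address) := by unfold Pre_gci2mem; infer_instance

def pvWitness_gci2mem : Int := 0x4060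

def Spec_gci2mem (gci_address : Int) (out : Int) : Prop := out = gci2mem_alt gci_address
instance (gci_address : Int) (out : Int) : Decidable (Spec_gci2mem gci_address out) := by unfold Spec_gci2mem; infer_instance

-- ===== CLAIM (what is proved, stated in full; the proofs are below) =====
def Claim_equal_gci2mem : Prop := ∀ (gci_address : Int), Dom_gci2mem gci_address → Pre_gci2mem gci_address → Spec_gci2mem gci_address (gci2mem gci_address)

-- ===== LEMMAS AND PROOFS =====

lemma sA0 : PySem.List.pyGetD aBlockSize (0:Int) 0 = 0 := by decide
lemma sA1 : PySem.List.pyGetD aBlockSize (1:Int) 0 = 7980 := by decide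
lemma mA1 : PySem.List.pyGetD aMemList (1:Int) 0 = 2152060600 := by decide
lemma sA2 : PySem.List.pyGetD aBlockSize (2:Int) 0 = 7980 := by decide
lemma mA2 : PySem.List.pyGetD aMemList (2:Int) 0 = 2152068580 := by decide
lemma sA3 : PySem.List.pyGetD aBlockSize (3:Int) 0 = 7980 := by decide
lemma mA3 : PySem.List.pyGetD aMemList (3:Int) 0 = 2152076560 := by decide
lemma sA4 : PySem.List.pyGetD aBlockSize (4:Int) 0 = 7980 := by decide
lemma mA4 : PySem.List.pyGetD aMemList (4:Int) 0 = 2152084540 := by decide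
lemma sA5 : PySem.List.pyGetD aBlockSize (5:Int) 0 = 7980 := by decide
lemma mA5 : PySem.List.pyGetD aMemList (5:Int) 0 = 2152092520 := by decide
lemma sA6 : PySem.List.pyGetD aBlockSize (6:Int) 0 = 7980 := by decide
lemma mA6 : PySem.List.pyGetD aMemList (6:Int) 0 = 2152100500 := by decide
lemma sA7 : PySem.List.pyGetD aBlockSize (7:Int) 0 = 7980 := by decide
lemma mA7 : PySem.List.pyGetD aMemList (7:Int) 0 = 2152108480 := by decide
lemma sA8 : PySem.List.pyGetD aBlockSize (8:Int) 0 = 0 := by decide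
lemma sA9 : PySem.List.pyGetD aBlockSize (9:Int) 0 = 6032 := by decide
lemma mA9 : PySem.List.pyGetD aMemList (9:Int) 0 = 2152054568 := by decide

lemma hEnumA : PySem.List.enumerate aBlockList = [(0, 0x2060), (1, 0x4060), (2, 0x6060), (3, 0x8060), (4, 0xa060), (5, 0xc060), (6, 0xe060), (7, 0x10060), (8, 0x12060), (9, 0x14060)] := by decide
lemma hsA : aBlockStart = 0x2060 := by decide
lemma heA : aBlockEnd = 0x157f0 := by decide

set_option maxHeartbeats 2000000 in
lemma loopA (a : Int) (k : Int) (hk : k = 1 ∨ k = 2 ∨ k = 3 ∨ k = 4 ∨ k = 5 ∨ k = 6 ∨ k = 7 ∨ k = 9)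
    (h1 : 0x2060 + k * 0x2000 ≤ a) (h2 : a < 0x2060 + k * 0x2000 + (if k = 9 then 0x1790 else 0x1f2c)) :
    aLoop a (-1) 0 [(0, 0x2060), (1, 0x4060), (2, 0x6060), (3, 0x8060), (4, 0xa060), (5, 0xc060), (6, 0xe060), (7, 0x10060), (8, 0x12060), (9, 0x14060)] = (k, a - (0x2060 + k * 0x2000)) := by
  simp only [aLoop, sA0, sA1, sA2, sA3, sA4, sA5, sA6, sA7, sA8, sA9]
  rcases hk with h|h|h|h|h|h|h|h <;> subst h <;> norm_num at h1 h2 ⊢ <;>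
    (split_ifs <;> first | (constructor <;> omega) | (exfalso; omega))

-- ===== VERDICT (by name: the statement is the Claim_ definition above) =====
set_option maxHeartbeats 1000000 in
theorem gci2mem_spec : Claim_equal_gci2mem := by
  intro a _ hpre
  obtain ⟨h1, h2, h3, h4⟩ := hpre
  unfold Spec_gci2mem gci2mem gci2mem_alt
  rw [hEnumA, hsA, heA]
  rw [show PySem.Int.floordiv (a - 0x2060) 0x2000 = (a - 0x2060) / 0x2000 from PySem.Int.floordiv_eq_ediv_of_pos (by norm_num),
      show PySem.Int.mod (a - 0x2060) 0x2000 = (a - 0x2060) % 0x2000 from PySem.Int.mod_eq_emod_of_pos (by norm_num)]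
  set k := (a - 0x2060) / 0x2000 with hkdef
  have hc : k = 1 ∨ k = 2 ∨ k = 3 ∨ k = 4 ∨ k = 5 ∨ k = 6 ∨ k = 7 ∨ k = 9 := by omega
  have hm : (a - 0x2060) % 0x2000 = a - 0x2060 - k * 0x2000 := by omega
  rw [hm]
  have hlow : 0x2060 + k * 0x2000 ≤ a := by omega
  have hhigh : a < 0x2060 + k * 0x2000 + (if k = 9 then 0x1790 else 0x1f2c) := by
    split_ifs <;> omega
  rw [loopA a k hc hlow hhigh]
  rcases hc with h|h|h|h|h|h|h|h <;> rw [h] <;>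
    simp only [mA1, mA2, mA3, mA4, mA5, mA6, mA7, mA9] <;> norm_num <;> split_ifs <;> omega
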